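-- pv_equiv track=rewrite | github.com/khanfardeen833-ship-it/frontend-facelift-kit | Backend/email_process.py | _is_conversational_email
-- ===== SOURCE A (Python) =====
-- def _is_conversational_email(subject: str, body: str) -> bool:
--     """Check if email is conversational"""
--     conversational_keywords = [
--         'how do i', 'what is', 'can you', 'could you', 'please help',
--         'tell me', 'explain', 'show me', 'list all', 'thank you',
--         'thanks', 'hi ', 'hello', 'hey', 'good morning', 'good afternoon',
--         'question about', 'help with', 'need help', 'assistance',
--         'wondering', 'curious', 'status of', 'check on', 'follow up'
--     ]
--
--     combined_text = f"{subject} {body}".lower()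
--
--     for keyword in conversational_keywords:
--         if keyword in combined_text:
--             return True
--
--     if '?' in combined_text:
--         return True
--
--     return False
-- ===== SOURCE B (Python) =====
-- _PATTERNS = (
--     "how do i|what is|can you|could you|please help|tell me|explain|show me|"
--     "list all|thank you|thanks|hi |hello|hey|good morning|good afternoon|"
--     "question about|help with|need help|assistance|wondering|curious|"
--     "status of|check on|follow up"
-- ).split('|') + ['?']
--
-- # first-character dispatch index, built once at module load
-- _INDEX = {}
-- for _p in _PATTERNS:
--     _INDEX[_p[0]] = _INDEX.get(_p[0], []) + [_p]
--
--
-- def _is_conversational_email(subject: str, body: str) -> bool: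
--     """One scan over the combined text: at each position, only the patterns
--     indexed under that character (including '?') are tested as prefixes."""
--     text = f"{subject} {body}".lower()
--     for i, c in enumerate(text):
--         for p in _INDEX.get(c, []):
--             if text.startswith(p, i):
--                 return True
--     return False
-- ===== Notes on version B (the rewrite author's own statement) =====
-- stated objective: alternative
-- what changed: Replaced the keyword-by-keyword loop of full substring searches (plus a separate '?' test) by a first-character dispatch index built once (dict: first char -> patterns, with '?' as one more pattern) and a single left-to-right scan that, at each position, prefix-tests only the bucket of patterns indexed under that character.
import Mathlib
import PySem

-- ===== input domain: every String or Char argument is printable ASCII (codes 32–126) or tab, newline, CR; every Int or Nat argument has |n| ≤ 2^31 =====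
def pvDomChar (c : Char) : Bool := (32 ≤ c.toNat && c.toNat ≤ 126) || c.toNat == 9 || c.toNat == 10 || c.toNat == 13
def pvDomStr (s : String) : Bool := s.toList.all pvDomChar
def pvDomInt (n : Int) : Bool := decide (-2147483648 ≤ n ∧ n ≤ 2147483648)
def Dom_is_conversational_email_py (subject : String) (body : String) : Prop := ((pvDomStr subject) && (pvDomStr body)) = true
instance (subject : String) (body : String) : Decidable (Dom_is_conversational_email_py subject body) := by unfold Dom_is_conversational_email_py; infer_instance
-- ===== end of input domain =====

set_option maxRecDepth 4096


-- B replaces A's loop of per-keyword substring searches by a first-character dispatch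
-- index (dict: first char -> patterns, '?' one more pattern) and a single scan of the text.

-- ===== PORT A =====
-- A's module-level keyword list
def pvKwsA : List (List Char) :=
  ["how do i".toList, "what is".toList, "can you".toList, "could you".toList,
   "please help".toList, "tell me".toList, "explain".toList, "show me".toList,
   "list all".toList, "thank you".toList, "thanks".toList, "hi ".toList,
   "hello".toList, "hey".toList, "good morning".toList, "good afternoon".toList,
   "question about".toList, "help with".toList, "need help".toList, "assistance".toList,
   "wondering".toList, "curious".toList, "status of".toList, "check on".toList,
   "follow up".toList]

-- A: for-loop with early return over the keyword list, then the '?' membership test.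
def is_conversational_email_py (subject : String) (body : String) : Bool :=
  let combined := PySem.Chars.lower (subject.toList ++ ' ' :: body.toList)
  if pvKwsA.any (fun k => PySem.Chars.isIn k combined) then true
  else if PySem.Chars.isIn ['?'] combined then true
  else false

-- ===== PORT B =====
-- Source B's module data: one '|'-joined string split into the keywords, plus '?' as one more pattern
def pvPatterns : List (List Char) :=
  PySem.Chars.splitOn ("how do i|what is|can you|could you|please help|tell me|explain|show me|" ++
    "list all|thank you|thanks|hi |hello|hey|good morning|good afternoon|" ++
    "question about|help with|need help|assistance|wondering|curious|" ++
    "status of|check on|follow up").toList "|".toList ++ ["?".toList]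

-- Source B's module-load loop: _INDEX[p[0]] = _INDEX.get(p[0], []) + [p]
-- (patterns are all nonempty, so p[0] is p.headD; the default ' ' is never used)
def pvIndex : PySem.Dict Char (List (List Char)) :=
  pvPatterns.foldl (fun d p => d.modify (p.headD ' ') [] (· ++ [p])) PySem.Dict.empty

-- Source B: for i, c in enumerate(text): for p in _INDEX.get(c, []): if text.startswith(p, i): …
-- text.startswith(p, i) with the nonnegative enumerate index i is p.isPrefixOf (text.drop i) — exact here
def is_conversational_email_py_alt (subject : String) (body : String) : Bool :=
  let text := PySem.Chars.lower (subject.toList ++ ' ' :: body.toList)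
  (PySem.List.enumerate text 0).any (fun ic =>
    (pvIndex.getD ic.2 []).any (fun p => p.isPrefixOf (text.drop ic.1.toNat)))

-- ===== PRECONDITION & SPEC =====
def Spec_is_conversational_email_py (subject : String) (body : String) (out : Bool) : Prop := out = is_conversational_email_py_alt subject body
instance (subject : String) (body : String) (out : Bool) : Decidable (Spec_is_conversational_email_py subject body out) := by unfold Spec_is_conversational_email_py; infer_instance

-- ===== CLAIM (what is proved, stated in full; the proofs are below) =====
def Claim_equal_is_conversational_email_py : Prop := ∀ (subject : String) (body : String), Dom_is_conversational_email_py subject body → Spec_is_conversational_email_py subject body (is_conversational_email_py subject body)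

-- ===== LEMMAS AND PROOFS =====

-- the bucket of character c holds exactly the patterns whose first character is c
lemma bucket_eq (c : Char) :
    pvIndex.getD c [] = pvPatterns.filter (fun p => p.headD ' ' == c) := by
  have h : pvPatterns.foldl (fun d p => d.modify (p.headD ' ') [] (· ++ [p])) PySem.Dict.empty
      = (pvPatterns.map (fun p => (p.headD ' ', p))).foldl
          (fun d q => d.modify q.1 [] (· ++ [q.2])) PySem.Dict.empty :=
    by rw [List.foldl_map]
  unfold pvIndex
  rw [h, PySem.Dict.getD_foldl_modify_append, PySem.Dict.getD_empty]
  simp [List.filter_map, Function.comp_def]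

-- bounded position-wise prefix search equals Python's substring test, for a nonempty pattern
lemma bounded_prefix_iff_isIn (t k : List Char) (hk : k ≠ []) :
    (∃ i < t.length, k <+: t.drop i) ↔ PySem.Chars.isIn k t = true := by
  rw [← PySem.Chars.exists_prefix_drop_iff_isIn]
  constructor
  · rintro ⟨i, _, h⟩; exact ⟨i, h⟩
  · rintro ⟨j, h⟩
    by_cases hj : j < t.length
    · exact ⟨j, hj, h⟩
    · rw [List.drop_eq_nil_of_le (le_of_not_gt hj)] at h
      exact absurd (List.prefix_nil.mp h) hk

theorem core (t : List Char) :
    (if pvKwsA.any (fun k => PySem.Chars.isIn k t) then true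
     else if PySem.Chars.isIn ['?'] t then true else false)
    = (PySem.List.enumerate t 0).any (fun ic =>
        (pvIndex.getD ic.2 []).any (fun p => p.isPrefixOf (t.drop ic.1.toNat))) := by
  have hne : ∀ p ∈ pvPatterns, p ≠ [] := by decide
  have hsplit : pvPatterns = pvKwsA ++ [['?']] := by decide
  have hB : ((PySem.List.enumerate t 0).any (fun ic =>
      (pvIndex.getD ic.2 []).any (fun p => p.isPrefixOf (t.drop ic.1.toNat))) = true)
      ↔ ∃ p ∈ pvPatterns, ∃ i < t.length, p <+: t.drop i := by
    simp only [List.any_eq_true, PySem.List.mem_enumerate_iff, List.isPrefixOf_iff_prefix]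
    constructor
    · rintro ⟨ic, ⟨k, hk, rfl⟩, p, hp, hpre⟩
      rw [bucket_eq] at hp
      simp only [List.mem_filter, beq_iff_eq] at hp
      refine ⟨p, hp.1, k, hk, ?_⟩
      simpa using hpre
    · rintro ⟨p, hp, k, hk, hpre⟩
      refine ⟨(0 + (k : Int), t[k]), ⟨k, hk, rfl⟩, p, ?_, by simpa using hpre⟩
      rw [bucket_eq]
      simp only [List.mem_filter, beq_iff_eq]
      refine ⟨hp, ?_⟩
      obtain ⟨a, p', rfl⟩ := List.exists_cons_of_ne_nil (hne p hp)
      have hdrop : (t.drop k).head? = some a := by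
        rcases hpre with ⟨s, hs⟩
        rw [← hs]; rfl
      rw [List.head?_drop] at hdrop
      simp only [List.headD]
      simp [List.getElem?_eq_getElem hk] at hdrop
      simp [hdrop]
  have hA : ((pvKwsA.any (fun k => PySem.Chars.isIn k t) || PySem.Chars.isIn ['?'] t) = true)
      ↔ ∃ p ∈ pvPatterns, ∃ i < t.length, p <+: t.drop i := by
    rw [hsplit]
    simp only [Bool.or_eq_true, List.any_eq_true, List.mem_append, List.mem_singleton]
    constructor
    · rintro (⟨k, hk, hkt⟩ | hq)
      · obtain ⟨i, hi, hp⟩ := (bounded_prefix_iff_isIn t k (by rintro rfl; revert hk; decide)).mpr hkt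
        exact ⟨k, Or.inl hk, i, hi, hp⟩
      · obtain ⟨i, hi, hp⟩ := (bounded_prefix_iff_isIn t ['?'] (by simp)).mpr hq
        exact ⟨['?'], Or.inr rfl, i, hi, hp⟩
    · rintro ⟨p, hp | rfl, i, hi, hpre⟩
      · exact Or.inl ⟨p, hp, (bounded_prefix_iff_isIn t p (by rintro rfl; revert hp; decide)).mp ⟨i, hi, hpre⟩⟩
      · exact Or.inr ((bounded_prefix_iff_isIn t ['?'] (by simp)).mp ⟨i, hi, hpre⟩)
  have := hA.trans hB.symm
  rw [Bool.eq_iff_iff] at this ⊢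
  rw [← this]
  cases hK : pvKwsA.any (fun k => PySem.Chars.isIn k t) <;>
    cases hQ : PySem.Chars.isIn ['?'] t <;> simp_all

-- ===== VERDICT (by name: the statement is the Claim_ definition above) =====
theorem is_conversational_email_py_spec : Claim_equal_is_conversational_email_py := by
  intro subject body _
  unfold Spec_is_conversational_email_py is_conversational_email_py is_conversational_email_py_alt
  exact core _
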